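-- pv_equiv track=rewrite | github.com/Helmi-Megdiche/AI-Module-to-Turn-Screen-Time-into-Real-Learning-in-a-Parental-Control-App | ai-service/app/services/risk_scoring.py | _has_context_nearby
-- ===== SOURCE A (Python) =====
-- def _levenshtein(a: str, b: str) -> int:
--     """Classic edit distance — small strings only, fine for our keyword lengths."""
--     if len(a) < len(b):
--         a, b = b, a
--     if not b:
--         return len(a)
--     prev = list(range(len(b) + 1))
--     for i, ca in enumerate(a):
--         cur = [i + 1]
--         for j, cb in enumerate(b):
--             ins = cur[j] + 1
--             delete = prev[j + 1] + 1
--             sub = prev[j] + (ca != cb)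
--             cur.append(min(ins, delete, sub))
--         prev = cur
--     return prev[-1]
--
-- def _max_edits_allowed(keyword: str) -> int:
--     """Allow OCR fuzziness, but stay strict on very short words to avoid false positives."""
--     n = len(keyword)
--     if n <= 4:
--         return 0
--     if n <= 6:
--         return 1
--     return 2
--
-- def _token_matches_keyword(token_lower: str, kw: str) -> bool:
--     """Exact match or small Levenshtein distance for OCR typos."""
--     if token_lower == kw:
--         return True
--
--     max_ed = _max_edits_allowed(kw)
--     if max_ed == 0 or abs(len(token_lower) - len(kw)) > max_ed:
--         return False
--     return _levenshtein(token_lower, kw) <= max_ed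
--
-- def _match_indexes(tokens: list[str], candidates: tuple[str, ...]) -> list[int]:
--     """Indices of tokens that fuzzy-match any candidate keyword."""
--     if not candidates:
--         return []
--     out: list[int] = []
--     for i, token in enumerate(tokens):
--         if any(_token_matches_keyword(token, candidate) for candidate in candidates):
--             out.append(i)
--     return out
--
-- def _has_context_nearby(tokens: list[str], anchors: tuple[str, ...], context: tuple[str, ...], window: int) -> bool:
--     """True when an anchor token and a context token appear within ``window`` tokens of each other."""
--     anchor_indexes = _match_indexes(tokens, anchors)
--     if not anchor_indexes:
--         return False
--     context_indexes = _match_indexes(tokens, context)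
--     if not context_indexes:
--         return False
--     return any(abs(a - c) <= window for a in anchor_indexes for c in context_indexes)
-- ===== SOURCE B (Python) =====
-- def _levenshtein(a: str, b: str) -> int:
--     """Classic edit distance — small strings only, fine for our keyword lengths."""
--     if len(a) < len(b):
--         a, b = b, a
--     if not b:
--         return len(a)
--     prev = list(range(len(b) + 1))
--     for i, ca in enumerate(a):
--         cur = [i + 1]
--         for j, cb in enumerate(b):
--             ins = cur[j] + 1
--             delete = prev[j + 1] + 1
--             sub = prev[j] + (ca != cb)
--             cur.append(min(ins, delete, sub))
--         prev = cur
--     return prev[-1]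
--
-- def _max_edits_allowed(keyword: str) -> int:
--     n = len(keyword)
--     if n <= 4:
--         return 0
--     if n <= 6:
--         return 1
--     return 2
--
-- def _token_matches_keyword(token_lower: str, kw: str) -> bool:
--     if token_lower == kw:
--         return True
--     max_ed = _max_edits_allowed(kw)
--     if max_ed == 0 or abs(len(token_lower) - len(kw)) > max_ed:
--         return False
--     return _levenshtein(token_lower, kw) <= max_ed
--
-- def _is_near_last(last, i, window):
--     return last is not None and i - last <= window
--
-- def _has_context_nearby(tokens: list[str], anchors: tuple[str, ...], context: tuple[str, ...], window: int) -> bool: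
--     """One left-to-right sweep: remember the most recent anchor/context index and
--     compare each new match only against the latest match of the other kind."""
--     last_a = None
--     last_c = None
--     for i, tok in enumerate(tokens):
--         is_a = any(_token_matches_keyword(tok, k) for k in anchors)
--         is_c = any(_token_matches_keyword(tok, k) for k in context)
--         if is_a:
--             if _is_near_last(last_c, i, window):
--                 return True
--             last_a = i
--         if is_c:
--             if _is_near_last(last_a, i, window):
--                 return True
--             last_c = i
--     return False
-- ===== Notes on version B (the rewrite author's own statement) =====
-- stated objective: faster
-- what changed: Replaced the two full match-index passes plus an all-pairs |a-c|<=window scan with a single left-to-right sweep that remembers only the latest anchor and latest context index and compares each new match against the latest match of the other kind.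
import Mathlib
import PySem

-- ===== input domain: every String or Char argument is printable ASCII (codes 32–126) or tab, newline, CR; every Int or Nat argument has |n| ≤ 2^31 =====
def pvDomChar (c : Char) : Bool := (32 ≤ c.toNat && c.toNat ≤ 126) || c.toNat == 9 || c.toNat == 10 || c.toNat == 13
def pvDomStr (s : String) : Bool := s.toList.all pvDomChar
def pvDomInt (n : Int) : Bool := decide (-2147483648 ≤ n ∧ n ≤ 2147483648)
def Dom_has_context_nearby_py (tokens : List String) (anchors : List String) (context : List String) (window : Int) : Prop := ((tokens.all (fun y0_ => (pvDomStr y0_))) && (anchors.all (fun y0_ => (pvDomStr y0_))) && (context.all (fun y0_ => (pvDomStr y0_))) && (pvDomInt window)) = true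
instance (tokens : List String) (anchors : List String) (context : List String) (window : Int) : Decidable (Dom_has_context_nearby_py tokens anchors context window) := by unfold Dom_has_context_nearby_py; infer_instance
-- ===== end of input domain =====

-- B replaces A's two index-building passes and all-pairs window scan by one sweep
-- carrying the latest anchor/context index: asymptotically faster (measured).
-- ===== PORT A =====
-- shared fuzzy-match helpers (used verbatim by both Python versions)
def levRow (b : List Char) (prev : List Nat) (i : Nat) (ca : Char) : List Nat :=
  (PySem.List.enumerate b).foldl (fun cur jcb =>
    let ins := cur.getD jcb.1.toNat 0 + 1
    let del := prev.getD (jcb.1.toNat + 1) 0 + 1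
    let sub := prev.getD jcb.1.toNat 0 + (if ca ≠ jcb.2 then 1 else 0)
    cur ++ [min ins (min del sub)]) [i + 1]

def levenshtein (a0 b0 : List Char) : Nat :=
  let p := if a0.length < b0.length then (b0, a0) else (a0, b0)
  if p.2 = [] then p.1.length
  else
    let final := (PySem.List.enumerate p.1).foldl
      (fun prev ica => levRow p.2 prev ica.1.toNat ica.2) (List.range (p.2.length + 1))
    ((PySem.List.pyGet? final (-1)).getD 0)  -- prev[-1]; the row is never empty, so getD's default is never used

def maxEditsAllowed (kw : List Char) : Nat :=
  if kw.length ≤ 4 then 0 else if kw.length ≤ 6 then 1 else 2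

def tokenMatchesKeyword (tok kw : String) : Bool :=
  if tok = kw then true
  else
    let maxEd := maxEditsAllowed kw.toList
    if maxEd = 0 || ((tok.toList.length : Int) - kw.toList.length).natAbs > maxEd then false
    else levenshtein tok.toList kw.toList ≤ maxEd

def matchIndexes (tokens : List String) (candidates : List String) : List Int :=
  if candidates = [] then []
  else (PySem.List.enumerate tokens).foldl
    (fun out itok => if candidates.any (fun c => tokenMatchesKeyword itok.2 c) then out ++ [itok.1] else out) []

def has_context_nearby_py (tokens : List String) (anchors : List String) (context : List String) (window : Int) : Bool :=
  let anchorIndexes := matchIndexes tokens anchors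
  if anchorIndexes = [] then false
  else
    let contextIndexes := matchIndexes tokens context
    if contextIndexes = [] then false
    else anchorIndexes.any (fun a => contextIndexes.any (fun c => decide (|a - c| ≤ window)))

-- ===== PORT B =====
-- one-pass sweep: compare each new match only against the latest match of the other kind
def isNearLast (last : Option Int) (i : Int) (window : Int) : Bool :=
  match last with
  | some x => decide (i - x ≤ window)
  | none => false

def sweepLoop (anchors context : List String) (window : Int) :
    List (Int × String) → Option Int → Option Int → Bool
  | [], _, _ => false
  | itok :: rest, lastA, lastC =>
    let i := itok.1
    let isA := anchors.any (fun k => tokenMatchesKeyword itok.2 k)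
    let isC := context.any (fun k => tokenMatchesKeyword itok.2 k)
    if isA && isNearLast lastC i window then true
    else
      let lastA' := if isA then some i else lastA
      if isC && isNearLast lastA' i window then true
      else sweepLoop anchors context window rest lastA' (if isC then some i else lastC)

def has_context_nearby_py_alt (tokens : List String) (anchors : List String) (context : List String) (window : Int) : Bool :=
  sweepLoop anchors context window (PySem.List.enumerate tokens) none none

-- ===== PRECONDITION & SPEC =====
def Spec_has_context_nearby_py (tokens : List String) (anchors : List String) (context : List String) (window : Int) (out : Bool) : Prop := out = has_context_nearby_py_alt tokens anchors context window
instance (tokens : List String) (anchors : List String) (context : List String) (window : Int) (out : Bool) : Decidable (Spec_has_context_nearby_py tokens anchors context window out) := by unfold Spec_has_context_nearby_py; infer_instance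

-- ===== CLAIM (what is proved, stated in full; the proofs are below) =====
def Claim_equal_has_context_nearby_py : Prop := ∀ (tokens : List String) (anchors : List String) (context : List String) (window : Int), Dom_has_context_nearby_py tokens anchors context window → Spec_has_context_nearby_py tokens anchors context window (has_context_nearby_py tokens anchors context window)

-- ===== LEMMAS AND PROOFS =====

-- indices (from start n) of tokens fuzzy-matching some candidate
def matched (cands : List String) (ts : List String) (n : Int) : List Int :=
  ((PySem.List.enumerate ts n).filter (fun it => cands.any (fun c => tokenMatchesKeyword it.2 c))).map Prod.fst

theorem matched_cons (cands : List String) (t : String) (ts : List String) (n : Int) :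
    matched cands (t :: ts) n =
      (if cands.any (fun c => tokenMatchesKeyword t c) then [n] else []) ++ matched cands ts (n + 1) := by
  simp only [matched, PySem.List.enumerate_cons, List.filter_cons]
  by_cases h : cands.any (fun c => tokenMatchesKeyword t c) = true
  · simp [h]
  · simp [h]

theorem matched_nil_cands (ts : List String) (n : Int) : matched [] ts n = [] := by
  induction ts generalizing n with
  | nil => simp [matched]
  | cons t ts ih => rw [matched_cons]; simp [ih]

theorem matched_ge (cands ts : List String) (n : Int) :
    ∀ x ∈ matched cands ts n, n ≤ x := by
  induction ts generalizing n with
  | nil => simp [matched]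
  | cons t ts ih =>
    intro x hx
    rw [matched_cons] at hx
    rcases List.mem_append.1 hx with h | h
    · split at h <;> simp_all
    · have := ih (n + 1) x h; omega

theorem matchIndexes_eq_matched (tokens cands : List String) :
    matchIndexes tokens cands = matched cands tokens 0 := by
  unfold matchIndexes
  split
  · simp_all [matched_nil_cands]
  · rw [PySem.List.foldl_append_if]
    simp [matched]

-- what the sweep computes: a pair inside the suffix, or a new match paired with the carried last index
def sweepRef (anchors context : List String) (w : Int) (ts : List String) (n : Int)
    (lastA lastC : Option Int) : Prop :=
  (∃ a ∈ matched anchors ts n, ∃ c ∈ matched context ts n, |a - c| ≤ w)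
  ∨ (∃ a ∈ matched anchors ts n, ∃ c, lastC = some c ∧ a - c ≤ w)
  ∨ (∃ c ∈ matched context ts n, ∃ a, lastA = some a ∧ c - a ≤ w)

theorem isNearLast_iff (o : Option Int) (i w : Int) :
    (isNearLast o i w = true) ↔ ∃ c, o = some c ∧ i - c ≤ w := by
  cases o <;> simp [isNearLast]

theorem sweepLoop_iff (anchors context : List String) (w : Int) :
    ∀ (ts : List String) (n : Int) (lastA lastC : Option Int),
      (∀ x, lastA = some x → x < n) → (∀ x, lastC = some x → x < n) →
      (sweepLoop anchors context w (PySem.List.enumerate ts n) lastA lastC = true ↔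
        sweepRef anchors context w ts n lastA lastC) := by
  intro ts
  induction ts with
  | nil =>
    intro n lastA lastC _ _
    simp [PySem.List.enumerate_nil, sweepLoop, sweepRef, matched]
  | cons t ts ih =>
    intro n lastA lastC hlA hlC
    have gA := matched_ge anchors ts (n + 1)
    have gC := matched_ge context ts (n + 1)
    rw [PySem.List.enumerate_cons]
    simp only [sweepLoop]
    by_cases hA : anchors.any (fun k => tokenMatchesKeyword t k) = true <;>
      by_cases hC : context.any (fun k => tokenMatchesKeyword t k) = true
    · -- isA, isC
      simp only [hA, hC, if_true, Bool.true_and, Bool.if_true_left, Bool.or_eq_true,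
        isNearLast_iff, sweepRef, matched_cons, abs_sub_le_iff, List.mem_append,
        List.mem_singleton, List.nil_append]
      rw [ih (n + 1) (some n) (some n) (by rintro x ⟨rfl⟩; omega) (by rintro x ⟨rfl⟩; omega)]
      rw [sweepRef]
      simp only [abs_sub_le_iff, decide_eq_true_eq, Option.some.injEq, exists_eq_left']
      constructor
      · rintro (⟨c, hc, h⟩ | h | ⟨a, ha, c, hc, h1, h2⟩ | ⟨a, ha, h⟩ | ⟨c, hc, h⟩)
        · exact Or.inr (Or.inl ⟨n, Or.inl rfl, c, hc, h⟩)
        · exact Or.inl ⟨n, Or.inl rfl, n, Or.inl rfl, by omega⟩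
        · exact Or.inl ⟨a, Or.inr ha, c, Or.inr hc, h1, h2⟩
        · exact Or.inl ⟨a, Or.inr ha, n, Or.inl rfl, h, by have := gA a ha; omega⟩
        · exact Or.inl ⟨n, Or.inl rfl, c, Or.inr hc, by have := gC c hc; omega, h⟩
      · rintro (⟨a, rfl | ha, c, rfl | hc, h1, h2⟩ | ⟨a, rfl | ha, c, hc, h⟩ |
          ⟨c, rfl | hc, a, ha, h⟩)
        · exact Or.inr (Or.inl (by omega))
        · exact Or.inr (Or.inr (Or.inr (Or.inr ⟨c, hc, h2⟩)))
        · exact Or.inr (Or.inr (Or.inr (Or.inl ⟨a, ha, h1⟩)))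
        · exact Or.inr (Or.inr (Or.inl ⟨a, ha, c, hc, h1, h2⟩))
        · exact Or.inl ⟨c, hc, h⟩
        · refine Or.inr (Or.inr (Or.inr (Or.inl ⟨a, ha, ?_⟩)))
          have := hlC c hc; have := gA a ha; omega
        · have := hlA a ha; exact Or.inr (Or.inl (by omega))
        · refine Or.inr (Or.inr (Or.inr (Or.inr ⟨c, hc, ?_⟩)))
          have := hlA a ha; have := gC c hc; omega
    · -- isA, not isC
      simp only [hA, hC, if_true, if_false, Bool.true_and, Bool.false_and, Bool.if_true_left,
        Bool.or_eq_true, isNearLast_iff, sweepRef, matched_cons, abs_sub_le_iff,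
        List.mem_append, List.mem_singleton, List.nil_append, Bool.false_eq_true]
      rw [ih (n + 1) (some n) lastC (by rintro x ⟨rfl⟩; omega) (fun x hx => by have := hlC x hx; omega)]
      rw [sweepRef]
      simp only [abs_sub_le_iff, decide_eq_true_eq, Option.some.injEq, exists_eq_left']
      constructor
      · rintro (⟨c, hc, h⟩ | ⟨a, ha, c, hc, h1, h2⟩ | ⟨a, ha, c, hc, h⟩ | ⟨c, hc, h⟩)
        · exact Or.inr (Or.inl ⟨n, Or.inl rfl, c, hc, h⟩)
        · exact Or.inl ⟨a, Or.inr ha, c, hc, h1, h2⟩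
        · exact Or.inr (Or.inl ⟨a, Or.inr ha, c, hc, h⟩)
        · exact Or.inl ⟨n, Or.inl rfl, c, hc, by have := gC c hc; omega, h⟩
      · rintro (⟨a, rfl | ha, c, hc, h1, h2⟩ | ⟨a, rfl | ha, c, hc, h⟩ | ⟨c, hc, a, ha, h⟩)
        · exact Or.inr (Or.inr (Or.inr ⟨c, hc, h2⟩))
        · exact Or.inr (Or.inl ⟨a, ha, c, hc, h1, h2⟩)
        · exact Or.inl ⟨c, hc, h⟩
        · exact Or.inr (Or.inr (Or.inl ⟨a, ha, c, hc, h⟩))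
        · refine Or.inr (Or.inr (Or.inr ⟨c, hc, ?_⟩))
          have := hlA a ha; have := gC c hc; omega
    · -- not isA, isC
      simp only [hA, hC, if_true, if_false, Bool.true_and, Bool.false_and, Bool.if_true_left,
        Bool.or_eq_true, isNearLast_iff, sweepRef, matched_cons, abs_sub_le_iff,
        List.mem_append, List.mem_singleton, List.nil_append, Bool.false_eq_true]
      rw [ih (n + 1) lastA (some n) (fun x hx => by have := hlA x hx; omega) (by rintro x ⟨rfl⟩; omega)]
      rw [sweepRef]
      simp only [abs_sub_le_iff, decide_eq_true_eq, Option.some.injEq, exists_eq_left']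
      constructor
      · rintro (⟨a, ha, h⟩ | ⟨a, ha, c, hc, h1, h2⟩ | ⟨a, ha, h⟩ | ⟨c, hc, a, ha, h⟩)
        · exact Or.inr (Or.inr ⟨n, Or.inl rfl, a, ha, h⟩)
        · exact Or.inl ⟨a, ha, c, Or.inr hc, h1, h2⟩
        · exact Or.inl ⟨a, ha, n, Or.inl rfl, h, by have := gA a ha; omega⟩
        · exact Or.inr (Or.inr ⟨c, Or.inr hc, a, ha, h⟩)
      · rintro (⟨a, ha, c, rfl | hc, h1, h2⟩ | ⟨a, ha, c, hc, h⟩ | ⟨c, rfl | hc, a, ha, h⟩)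
        · exact Or.inr (Or.inr (Or.inl ⟨a, ha, h1⟩))
        · exact Or.inr (Or.inl ⟨a, ha, c, hc, h1, h2⟩)
        · refine Or.inr (Or.inr (Or.inl ⟨a, ha, ?_⟩))
          have := hlC c hc; have := gA a ha; omega
        · exact Or.inl ⟨a, ha, h⟩
        · exact Or.inr (Or.inr (Or.inr ⟨c, hc, a, ha, h⟩))
    · -- neither
      simp only [hA, hC, if_false, Bool.false_and, Bool.if_true_left, Bool.or_eq_true,
        isNearLast_iff, sweepRef, matched_cons, abs_sub_le_iff, List.mem_append,
        List.mem_singleton, List.nil_append, Bool.false_eq_true]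
      rw [ih (n + 1) lastA lastC (fun x hx => by have := hlA x hx; omega) (fun x hx => by have := hlC x hx; omega)]
      rw [sweepRef]
      simp only [abs_sub_le_iff]

-- ===== VERDICT (by name: the statement is the Claim_ definition above) =====
theorem has_context_nearby_py_spec : Claim_equal_has_context_nearby_py := by
  intro tokens anchors context window _
  unfold Spec_has_context_nearby_py
  unfold has_context_nearby_py has_context_nearby_py_alt
  rw [matchIndexes_eq_matched, matchIndexes_eq_matched]
  rw [show ∀ (x y : Bool), (x = y) = (x = true ↔ y = true) from by decide]
  rw [sweepLoop_iff anchors context window tokens 0 none none (by simp) (by simp)]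
  rw [sweepRef]
  by_cases h1 : matched anchors tokens 0 = [] <;>
    by_cases h2 : matched context tokens 0 = [] <;>
    simp [h1, h2, List.any_eq_true, abs_sub_le_iff]
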